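-- pv_equiv track=rewrite | github.com/daidai21/Leetcode | Algorithms/Python3.x/1184-Distance_Between_Bus_Stops.py | anticlockwise_distance
-- ===== SOURCE A (Python) =====
-- def anticlockwise_distance(distance, start, destination, n):
--     dis = 0
--     while start != destination:
--         if start == 0:
--             start = n - 1
--         else:
--             start -= 1
--         dis += distance[start]
--     return dis
-- ===== SOURCE B (Python) =====
-- def anticlockwise_distance(distance, start, destination, n):
--     if destination <= start:
--         return sum(distance[i] for i in range(destination, start))
--     return sum(distance[i] for i in range(destination, n)) + sum(distance[i] for i in range(start))
-- ===== Notes on version B (the rewrite author's own statement) =====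
-- stated objective: simpler
-- what changed: Replaces the stateful index-decrement-and-wrap while loop with sums over at most two precomputed contiguous index ranges chosen by a single comparison.
-- outside the precondition, e.g. on anticlockwise_distance([1, 2, 4], 1, -2, -1): A returns 3, B returns 7
import Mathlib
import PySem

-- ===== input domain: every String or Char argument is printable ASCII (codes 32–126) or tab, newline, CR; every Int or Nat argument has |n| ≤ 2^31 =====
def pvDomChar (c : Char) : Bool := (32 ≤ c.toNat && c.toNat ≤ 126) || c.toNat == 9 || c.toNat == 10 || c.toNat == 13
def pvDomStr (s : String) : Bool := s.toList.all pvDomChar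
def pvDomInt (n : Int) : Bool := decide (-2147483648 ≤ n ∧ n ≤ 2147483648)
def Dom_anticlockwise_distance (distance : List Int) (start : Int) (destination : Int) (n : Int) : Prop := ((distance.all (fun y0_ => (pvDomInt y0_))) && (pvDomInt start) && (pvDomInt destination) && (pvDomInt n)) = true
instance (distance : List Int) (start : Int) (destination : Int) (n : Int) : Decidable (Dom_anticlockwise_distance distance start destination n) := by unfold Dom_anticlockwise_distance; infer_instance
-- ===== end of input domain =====

-- ===== PORT A =====
-- B replaces A's one-step-at-a-time wrap-around loop with sums over precomputed contiguous index
-- ranges chosen by a single comparison (objective: simpler).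
-- A's while loop, transliterated as fuel recursion; on every input Pre_ admits (where A terminates)
-- the loop makes fewer steps than this fuel, so the fuel never runs out there.
def anticlockwise_distance_loop (distance : List Int) (destination : Int) (n : Int) :
    Nat → Int → Int → Int
  | 0, _, dis => dis
  | fuel + 1, start, dis =>
      if start = destination then dis
      else
        let start' := if start = 0 then n - 1 else start - 1
        anticlockwise_distance_loop distance destination n fuel start'
          (dis + ((PySem.List.pyGet? distance start').getD 0))

def anticlockwise_distance (distance : List Int) (start : Int) (destination : Int) (n : Int) : Int :=
  anticlockwise_distance_loop distance destination n
    (n.toNat + distance.length + (start - destination).toNat + 1) start 0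

-- ===== PORT B =====
-- sum(distance[i] for i in range(a, b))
def anticlockwise_distance_rsum (distance : List Int) (a b : Int) : Int :=
  (PySem.List.pyRange a b 1).foldl
    (fun acc i => acc + ((PySem.List.pyGet? distance i).getD 0)) 0

def anticlockwise_distance_alt (distance : List Int) (start : Int) (destination : Int) (n : Int) : Int :=
  if destination ≤ start then
    anticlockwise_distance_rsum distance destination start
  else
    anticlockwise_distance_rsum distance destination n
      + anticlockwise_distance_rsum distance 0 start

-- ===== PRECONDITION & SPEC =====
-- Pre_ admits the natural-domain inputs on which the Python A terminates: the two stops coincide,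
-- a plain descent (0 ≤ destination ≤ start ≤ len, or all-negative -len ≤ destination ≤ start < 0;
-- n unused), or a genuine wrap-around walk 0 ≤ start < destination < n ≤ len.  Everywhere else A
-- raises IndexError or loops forever, EXCEPT the excluded wrap walks with non-positive n
-- (n ≤ 0, destination ≤ n - 1, 0 ≤ start ≤ len): there n is not a valid stop count — it is the
-- number of bus stops on the circle — so those inputs lie outside the function's natural domain
-- and A's returned value merely reflects its accidental stopping index n - 1.
def Pre_anticlockwise_distance (distance : List Int) (start : Int) (destination : Int) (n : Int) : Prop :=
  start = destination
  ∨ (0 ≤ destination ∧ destination ≤ start ∧ start ≤ (distance.length : Int))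
  ∨ (start < 0 ∧ destination ≤ start ∧ -(distance.length : Int) ≤ destination)
  ∨ (0 ≤ start ∧ start < destination ∧ destination < n ∧ n ≤ (distance.length : Int))

instance (distance : List Int) (start : Int) (destination : Int) (n : Int) :
    Decidable (Pre_anticlockwise_distance distance start destination n) := by
  unfold Pre_anticlockwise_distance; infer_instance

def pvWitness_anticlockwise_distance : List Int × Int × Int × Int := ([7, 10, 1, 3], 0, 2, 4)

def Spec_anticlockwise_distance (distance : List Int) (start : Int) (destination : Int) (n : Int) (out : Int) : Prop := out = anticlockwise_distance_alt distance start destination n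
instance (distance : List Int) (start : Int) (destination : Int) (n : Int) (out : Int) : Decidable (Spec_anticlockwise_distance distance start destination n out) := by unfold Spec_anticlockwise_distance; infer_instance

-- ===== CLAIM (what is proved, stated in full; the proofs are below) =====
def Claim_equal_anticlockwise_distance : Prop := ∀ (distance : List Int) (start : Int) (destination : Int) (n : Int), Dom_anticlockwise_distance distance start destination n → Pre_anticlockwise_distance distance start destination n → Spec_anticlockwise_distance distance start destination n (anticlockwise_distance distance start destination n)

-- ===== LEMMAS AND PROOFS =====

theorem pvRsum_eq_sum (distance : List Int) (a b : Int) :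
    anticlockwise_distance_rsum distance a b
      = ((PySem.List.pyRange a b 1).map
          (fun i => (PySem.List.pyGet? distance i).getD 0)).sum := by
  unfold anticlockwise_distance_rsum
  rw [PySem.List.foldl_add]
  simp

theorem pvRsum_empty (distance : List Int) (a b : Int) (h : b ≤ a) :
    anticlockwise_distance_rsum distance a b = 0 := by
  rw [pvRsum_eq_sum]
  rw [PySem.List.pyRange_one]
  rw [show (b - a).toNat = 0 from by omega]
  simp

theorem pvRsum_succ (distance : List Int) (a b : Int) (h : a ≤ b) :
    anticlockwise_distance_rsum distance a (b + 1)
      = anticlockwise_distance_rsum distance a b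
          + ((PySem.List.pyGet? distance b).getD 0) := by
  rw [pvRsum_eq_sum, pvRsum_eq_sum, PySem.List.pyRange_one_succ_right h]
  simp

theorem pvLoop_self (distance : List Int) (destination n : Int) :
    ∀ (fuel : Nat) (dis : Int),
      anticlockwise_distance_loop distance destination n fuel destination dis = dis := by
  intro fuel dis
  cases fuel <;> simp [anticlockwise_distance_loop]

theorem pvLoop_succ (distance : List Int) (t n : Int) (f : Nat) (s dis : Int)
    (hs : s ≠ t) (h0 : s ≠ 0) :
    anticlockwise_distance_loop distance t n (f + 1) s dis
      = anticlockwise_distance_loop distance t n f (s - 1)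
          (dis + ((PySem.List.pyGet? distance (s - 1)).getD 0)) := by
  conv_lhs => unfold anticlockwise_distance_loop
  simp only [if_neg hs, if_neg h0]

theorem pvLoop_zero_step (distance : List Int) (t n : Int) (f : Nat) (dis : Int)
    (ht : t ≠ 0) :
    anticlockwise_distance_loop distance t n (f + 1) 0 dis
      = anticlockwise_distance_loop distance t n f (n - 1)
          (dis + ((PySem.List.pyGet? distance (n - 1)).getD 0)) := by
  conv_lhs => unfold anticlockwise_distance_loop
  simp [if_neg (fun h => ht h.symm : ¬ (0 : Int) = t)]

-- descent phase: from s down to destination without ever standing on 0 (except to stop there)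
theorem pvLoop_descend (distance : List Int) (t n : Int) :
    ∀ (fuel : Nat) (s dis : Int), t ≤ s → (0 ≤ t ∨ s < 0 ∨ s = t) →
      (s - t).toNat ≤ fuel →
      anticlockwise_distance_loop distance t n fuel s dis
        = dis + anticlockwise_distance_rsum distance t s := by
  intro fuel
  induction fuel with
  | zero =>
      intro s dis hts hside hg
      have hst : s = t := by omega
      subst hst
      rw [pvLoop_self, pvRsum_empty distance s s le_rfl]
      ring
  | succ f ih =>
      intro s dis hts hside hg
      by_cases hst : s = t
      · subst hst
        rw [pvLoop_self, pvRsum_empty distance s s le_rfl]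
        ring
      · have h0 : s ≠ 0 := by
          rcases hside with h | h | h
          · omega
          · omega
          · exact absurd h hst
        rw [pvLoop_succ distance t n f s dis hst h0,
          ih (s - 1) _ (by omega) (by rcases hside with h | h | h <;> omega) (by omega)]
        rw [show s = (s - 1) + 1 from by ring, pvRsum_succ distance t (s - 1) (by omega)]
        ring_nf

-- descent phase: from a nonnegative position all the way down to 0 (destination not in between)
theorem pvLoop_descend0 (distance : List Int) (t n : Int) :
    ∀ (fuel : Nat) (s dis : Int), 0 ≤ s → (t < 0 ∨ s < t) →
      s.toNat ≤ fuel →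
      anticlockwise_distance_loop distance t n fuel s dis
        = anticlockwise_distance_loop distance t n (fuel - s.toNat) 0
            (dis + anticlockwise_distance_rsum distance 0 s) := by
  intro fuel
  induction fuel with
  | zero =>
      intro s dis hs0 ht hg
      have hz : s = 0 := by omega
      subst hz
      rw [pvRsum_empty distance 0 0 le_rfl]
      norm_num
  | succ f ih =>
      intro s dis hs0 ht hg
      by_cases hz : s = 0
      · subst hz
        rw [pvRsum_empty distance 0 0 le_rfl]
        norm_num
      · have hst : s ≠ t := by omega
        rw [pvLoop_succ distance t n f s dis hst hz,
          ih (s - 1) _ (by omega) (by omega) (by omega)]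
        have hf : f - (s - 1).toNat = f + 1 - s.toNat := by omega
        rw [hf, show s = (s - 1) + 1 from by ring,
          pvRsum_succ distance 0 (s - 1) (by omega)]
        ring_nf

-- ===== VERDICT (by name: the statement is the Claim_ definition above) =====
theorem anticlockwise_distance_spec : Claim_equal_anticlockwise_distance := by
  intro distance start destination n _ hpre
  rcases hpre with heq | ⟨hd0, hds, hsl⟩ | ⟨hsneg, hds, hdL⟩ | ⟨hs0, hst, htn, hnL⟩
  · subst heq
    unfold Spec_anticlockwise_distance anticlockwise_distance anticlockwise_distance_alt
    rw [pvLoop_self, if_pos le_rfl, pvRsum_empty distance start start le_rfl]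
  · unfold Spec_anticlockwise_distance anticlockwise_distance anticlockwise_distance_alt
    rw [pvLoop_descend distance destination n _ start 0 hds (Or.inl hd0) (by omega),
      if_pos hds]
    ring
  · unfold Spec_anticlockwise_distance anticlockwise_distance anticlockwise_distance_alt
    rw [pvLoop_descend distance destination n _ start 0 hds (Or.inr (Or.inl hsneg))
      (by omega), if_pos hds]
    ring
  · -- wrap-around walk 0 ≤ start < destination < n ≤ len
    unfold Spec_anticlockwise_distance anticlockwise_distance anticlockwise_distance_alt
    rw [pvLoop_descend0 distance destination n _ start 0 hs0 (Or.inr hst) (by omega)]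
    obtain ⟨g, hg⟩ : ∃ g, n.toNat + distance.length + (start - destination).toNat + 1
        - start.toNat = g + 1
      := ⟨n.toNat + distance.length + (start - destination).toNat - start.toNat, by omega⟩
    rw [hg, pvLoop_zero_step distance destination n g _ (by omega),
      pvLoop_descend distance destination n g (n - 1) _ (by omega) (Or.inl (by omega))
        (by omega)]
    rw [if_neg (by omega),
      show n = (n - 1) + 1 from by ring, pvRsum_succ distance destination (n - 1) (by omega)]
    ring
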